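-- pv_equiv track=rewrite | github.com/opastorello/a10-guardian | src/a10_guardian/services/zone_change_service.py | normalize_zone_for_comparison
-- ===== SOURCE A (Python) =====
-- def normalize_zone_for_comparison(zone: dict) -> dict:
--     """Normalize zone config by removing volatile fields.
--
--     Args:
--         zone: Raw zone configuration
--
--     Returns:
--         Normalized zone config with volatile fields removed
--     """
--     normalized = zone.copy()
--
--     # Remove timestamp fields (these change frequently)
--     volatile_fields = [
--         "created",
--         "created_time",
--         "modified",
--         "modified_time",
--         "last_modified",
--         "updated_at",
--         "stats",
--         "counters",
--         "runtime_stats",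
--     ]
--
--     for field in volatile_fields:
--         normalized.pop(field, None)
--
--     return normalized
-- ===== SOURCE B (Python) =====
-- VOLATILE_FIELDS = frozenset({
--     "created",
--     "created_time",
--     "modified",
--     "modified_time",
--     "last_modified",
--     "updated_at",
--     "stats",
--     "counters",
--     "runtime_stats",
-- })
--
--
-- def normalize_zone_for_comparison(zone: dict) -> dict:
--     """Normalize zone config by keeping only non-volatile fields."""
--     return {k: v for k, v in zone.items() if k not in VOLATILE_FIELDS}
-- ===== Notes on version B (the rewrite author's own statement) =====
-- stated objective: idiomatic
-- what changed: Replaces copy-the-whole-dict-then-pop-nine-named-keys with a single dict comprehension over zone.items() that keeps every pair whose key is not in a frozenset of volatile field names.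
import Mathlib
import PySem

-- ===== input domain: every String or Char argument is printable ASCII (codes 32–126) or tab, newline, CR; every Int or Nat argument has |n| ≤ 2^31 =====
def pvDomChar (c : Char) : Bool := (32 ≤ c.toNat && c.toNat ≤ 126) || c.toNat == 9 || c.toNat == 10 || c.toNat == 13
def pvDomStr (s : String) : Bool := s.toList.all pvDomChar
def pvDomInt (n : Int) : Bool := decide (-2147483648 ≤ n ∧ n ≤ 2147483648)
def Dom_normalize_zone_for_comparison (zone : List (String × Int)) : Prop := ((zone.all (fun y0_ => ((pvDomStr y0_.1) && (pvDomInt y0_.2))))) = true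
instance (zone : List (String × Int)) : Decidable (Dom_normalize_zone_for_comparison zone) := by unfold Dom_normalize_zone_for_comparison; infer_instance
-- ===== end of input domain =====

-- B replaces A's "copy the dict, then pop nine named keys" with one filtering pass over
-- the items that keeps every pair whose key is not in the volatile set (idiomatic; same cost).

-- ===== PORT A =====
-- dict.pop(field, None) on the association list: drop the (unique) entry with that key.
def pvPop (d : List (String × Int)) (k : String) : List (String × Int) :=
  match d with
  | [] => []
  | (k', v) :: rest => if k' == k then rest else (k', v) :: pvPop rest k

def pvVolatileFields : List String :=
  ["created", "created_time", "modified", "modified_time", "last_modified",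
   "updated_at", "stats", "counters", "runtime_stats"]

def normalize_zone_for_comparison (zone : List (String × Int)) : List (String × Int) :=
  pvVolatileFields.foldl pvPop zone

-- ===== PORT B =====
-- the frozenset of volatile field names
def pvVolatileSet : PySem.Set String := PySem.Set.ofList pvVolatileFields

def normalize_zone_for_comparison_alt (zone : List (String × Int)) : List (String × Int) :=
  zone.filter (fun kv => !(pvVolatileSet.contains kv.1))

-- ===== PRECONDITION & SPEC =====
-- Pre_ excludes association lists with duplicate keys: such a list does not represent any
-- Python dict (dict construction collapses duplicates), so no dict-level behaviour of A is
-- defined there; every real dict input satisfies Pre_.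
def Pre_normalize_zone_for_comparison (zone : List (String × Int)) : Prop :=
  (zone.map Prod.fst).Nodup
instance (zone : List (String × Int)) : Decidable (Pre_normalize_zone_for_comparison zone) := by
  unfold Pre_normalize_zone_for_comparison; infer_instance

def pvWitness_normalize_zone_for_comparison : (List (String × Int)) :=
  [("name", 1), ("created", 2), ("ttl", 300)]

def Spec_normalize_zone_for_comparison (zone : List (String × Int)) (out : List (String × Int)) : Prop := out = normalize_zone_for_comparison_alt zone
instance (zone : List (String × Int)) (out : List (String × Int)) : Decidable (Spec_normalize_zone_for_comparison zone out) := by unfold Spec_normalize_zone_for_comparison; infer_instance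

-- ===== CLAIM (what is proved, stated in full; the proofs are below) =====
def Claim_equal_normalize_zone_for_comparison : Prop := ∀ (zone : List (String × Int)), Dom_normalize_zone_for_comparison zone → Pre_normalize_zone_for_comparison zone → Spec_normalize_zone_for_comparison zone (normalize_zone_for_comparison zone)

-- ===== LEMMAS AND PROOFS =====

-- On a duplicate-free association list, popping a key is filtering it out.
theorem pvPop_eq_filter (d : List (String × Int)) (k : String)
    (h : (d.map Prod.fst).Nodup) :
    pvPop d k = d.filter (fun kv => !(kv.1 == k)) := by
  induction d with
  | nil => rfl
  | cons p rest ih =>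
    obtain ⟨k', v⟩ := p
    simp only [List.map_cons, List.nodup_cons] at h
    simp only [pvPop, List.filter_cons]
    by_cases hk : k' == k
    · simp only [hk, Bool.not_true, Bool.false_eq_true]
      · symm
        apply List.filter_eq_self.2
        intro kv hkv
        have : kv.1 ≠ k' := by
          intro he
          exact h.1 (he ▸ (List.mem_map.2 ⟨kv, hkv, rfl⟩))
        simp only [beq_iff_eq] at hk
        subst hk
        simp [this]
    · simp only [hk, Bool.not_false]
      rw [ih h.2]
      simp at hk
      simp

theorem pvPop_keys_sublist (d : List (String × Int)) (k : String) :
    (pvPop d k).Sublist d := by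
  induction d with
  | nil => exact List.Sublist.refl _
  | cons p rest ih =>
    obtain ⟨k', v⟩ := p
    simp only [pvPop]
    by_cases hk : k' == k
    · simp [hk]
    · rw [if_neg hk]
      exact List.Sublist.cons₂ _ ih

theorem foldl_pvPop_eq_filter (fs : List String) (d : List (String × Int))
    (h : (d.map Prod.fst).Nodup) :
    fs.foldl pvPop d = d.filter (fun kv => !(fs.contains kv.1)) := by
  induction fs generalizing d with
  | nil => simp
  | cons f fs ih =>
    simp only [List.foldl_cons]
    have hsub : ((pvPop d f).map Prod.fst).Nodup :=
      h.sublist ((pvPop_keys_sublist d f).map Prod.fst)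
    rw [ih _ hsub, pvPop_eq_filter d f h, List.filter_filter]
    apply List.filter_congr
    intro kv _
    simp [Bool.not_or, Bool.and_comm, beq_eq_decide]

-- ===== VERDICT (by name: the statement is the Claim_ definition above) =====
theorem normalize_zone_for_comparison_spec : Claim_equal_normalize_zone_for_comparison := by
  intro zone _ hpre
  unfold Spec_normalize_zone_for_comparison normalize_zone_for_comparison
    normalize_zone_for_comparison_alt
  rw [foldl_pvPop_eq_filter _ _ hpre]
  apply List.filter_congr
  intro kv _
  simp [pvVolatileSet, PySem.Set.contains, PySem.Set.mem_ofList, pvVolatileFields]
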